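-- pv_equiv track=rewrite | github.com/d-gurgurov/Algorithms-Data-Structures | src/8-longest-subarray.py | count_long_subarrays
-- ===== SOURCE A (Python) =====
-- def count_long_subarrays(A):
--     n = len(A)
--     if n == 0:
--         return 0
--
--     # variables
--     count_max_len = 0
--     max_len = 0
--     current_len = 1
--
--     for i in range(0, n):
--         if A[i] > A[i-1]:
--             current_len += 1
--         else:
--             current_len = 1
--
--         if current_len == max_len:
--             count_max_len += 1
--         elif current_len > max_len:
--             max_len = current_len
--             count_max_len = 1
--
--     return count_max_len
-- ===== SOURCE B (Python) =====
-- def count_long_subarrays(A):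
--     # Two-phase decomposition: first materialize the increasing-run length at
--     # every position (keeping the i=0 comparison A[0] > A[-1] of the original
--     # recurrence), then reduce with max() and .count().
--     if not A:
--         return 0
--     runs = []
--     cur = 1
--     for i in range(len(A)):
--         cur = cur + 1 if A[i] > A[i-1] else 1
--         runs.append(cur)
--     max_len = max(runs)
--     return runs.count(max_len)
-- ===== Notes on version B (the rewrite author's own statement) =====
-- stated objective: alternative
-- what changed: B splits A's fused single loop into two phases: it first builds the list of per-position increasing-run lengths (same recurrence, including the i=0 wrap-around comparison), then computes the answer as runs.count(max(runs)) instead of maintaining max/count online inside the loop.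
import Mathlib
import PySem

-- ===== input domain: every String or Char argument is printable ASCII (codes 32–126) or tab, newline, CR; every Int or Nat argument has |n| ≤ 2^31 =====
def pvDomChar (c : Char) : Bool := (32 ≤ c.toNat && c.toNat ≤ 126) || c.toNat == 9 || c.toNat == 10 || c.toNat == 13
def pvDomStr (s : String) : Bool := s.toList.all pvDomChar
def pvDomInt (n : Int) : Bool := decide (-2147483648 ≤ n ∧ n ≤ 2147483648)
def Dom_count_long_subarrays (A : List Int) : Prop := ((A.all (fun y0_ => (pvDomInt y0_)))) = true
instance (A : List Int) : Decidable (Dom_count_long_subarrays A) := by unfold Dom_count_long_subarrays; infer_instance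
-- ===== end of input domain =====

-- B replaces A's fused loop (online max/count) by a two-phase decomposition:
-- build the list of per-position run lengths, then reduce with max and count.
-- Same O(n) cost; objective: alternative decomposition.


-- ===== PORT A =====
-- Indices i and i-1 are always in range for Python (i-1 = -1 wraps to the last
-- element), so pyGetD's default 0 is never used.
def count_long_subarrays (A : List Int) : Int :=
  let n : Int := A.length
  if n = 0 then 0
  else
    let s := (PySem.List.pyRange 0 n 1).foldl
      (fun (st : Int × Int × Int) i =>
        let cur : Int :=
          if PySem.List.pyGetD A i 0 > PySem.List.pyGetD A (i-1) 0 then st.2.2 + 1 else 1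
        if cur = st.2.1 then (st.1 + 1, st.2.1, cur)
        else if st.2.1 < cur then (1, cur, cur)
        else (st.1, st.2.1, cur))
      (0, 0, 1)
    s.1

-- ===== PORT B =====
def count_long_subarrays_alt (A : List Int) : Int :=
  if A = [] then 0
  else
    let p := (PySem.List.pyRange 0 (A.length : Int) 1).foldl
      (fun (st : List Int × Int) i =>
        let cur : Int :=
          if PySem.List.pyGetD A i 0 > PySem.List.pyGetD A (i-1) 0 then st.2 + 1 else 1
        (st.1 ++ [cur], cur))
      ([], 1)
    match PySem.List.max? p.1 (fun x => x) with
    | some m => PySem.List.count p.1 m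
    | none => 0

-- ===== PRECONDITION & SPEC =====
def Spec_count_long_subarrays (A : List Int) (out : Int) : Prop := out = count_long_subarrays_alt A
instance (A : List Int) (out : Int) : Decidable (Spec_count_long_subarrays A out) := by unfold Spec_count_long_subarrays; infer_instance

-- ===== CLAIM (what is proved, stated in full; the proofs are below) =====
def Claim_equal_count_long_subarrays : Prop := ∀ (A : List Int), Dom_count_long_subarrays A → Spec_count_long_subarrays A (count_long_subarrays A)

-- ===== LEMMAS AND PROOFS =====

-- A's loop body (proof-side name; definitionally the lambda in the port of A)
def pvStepA (A : List Int) (st : Int × Int × Int) (i : Int) : Int × Int × Int :=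
  let cur : Int :=
    if PySem.List.pyGetD A i 0 > PySem.List.pyGetD A (i-1) 0 then st.2.2 + 1 else 1
  if cur = st.2.1 then (st.1 + 1, st.2.1, cur)
  else if st.2.1 < cur then (1, cur, cur)
  else (st.1, st.2.1, cur)

-- B's loop body (proof-side name; definitionally the lambda in the port of B)
def pvStepB (A : List Int) (st : List Int × Int) (i : Int) : List Int × Int :=
  let cur : Int :=
    if PySem.List.pyGetD A i 0 > PySem.List.pyGetD A (i-1) 0 then st.2 + 1 else 1
  (st.1 ++ [cur], cur)

-- Invariant carried through both folds: A's (count, max, cur) state describes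
-- B's accumulated run list.
lemma pv_fold_rel (A : List Int) (L : List Int) :
    ∀ (rs : List Int) (cnt maxl cur : Int),
      maxl = rs.foldl max 0 →
      cnt = (rs.count maxl : Int) →
      (∀ x ∈ rs, 1 ≤ x) →
      1 ≤ cur →
      ∃ rs',
        L.foldl (pvStepB A) (rs, cur) = (rs', (L.foldl (pvStepA A) (cnt, maxl, cur)).2.2) ∧
        (L.foldl (pvStepA A) (cnt, maxl, cur)).2.1 = rs'.foldl max 0 ∧
        (L.foldl (pvStepA A) (cnt, maxl, cur)).1
          = (rs'.count ((L.foldl (pvStepA A) (cnt, maxl, cur)).2.1) : Int) ∧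
        (∀ x ∈ rs', 1 ≤ x) ∧
        rs'.length = rs.length + L.length := by
  induction L with
  | nil =>
    intro rs cnt maxl cur h1 h2 h3 _
    exact ⟨rs, rfl, h1, h2, h3, by simp⟩
  | cons i L ih =>
    intro rs cnt maxl cur h1 h2 h3 hcur
    set c : Int :=
      (if PySem.List.pyGetD A i 0 > PySem.List.pyGetD A (i-1) 0 then cur + 1 else 1) with hc
    have hc1 : 1 ≤ c := by rw [hc]; split <;> omega
    have hmax : (rs ++ [c]).foldl max 0 = max maxl c := by
      rw [List.foldl_append, ← h1]; simp
    have hB : pvStepB A (rs, cur) i = (rs ++ [c], c) := rfl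
    rcases lt_trichotomy c maxl with hlt | heq | hgt
    · have hA : pvStepA A (cnt, maxl, cur) i = (cnt, maxl, c) := by
        simp only [pvStepA, ← hc]
        rw [if_neg (by omega), if_neg (by omega)]
      rw [List.foldl_cons, List.foldl_cons, hB, hA]
      obtain ⟨rs'', a1, a2, a3, a4, a5⟩ := ih (rs ++ [c]) cnt maxl c
        (by rw [hmax]; omega)
        (by rw [h2, List.count_append, List.count_singleton]; simp [hlt.ne])
        (by
          intro x hx
          rcases List.mem_append.1 hx with hx | hx
          · exact h3 x hx
          · simp at hx; omega)
        hc1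
      exact ⟨rs'', a1, a2, a3, a4, by simp at a5 ⊢; omega⟩
    · have hA : pvStepA A (cnt, maxl, cur) i = (cnt + 1, maxl, c) := by
        simp only [pvStepA, ← hc]
        rw [if_pos heq]
      rw [List.foldl_cons, List.foldl_cons, hB, hA]
      obtain ⟨rs'', a1, a2, a3, a4, a5⟩ := ih (rs ++ [c]) (cnt + 1) maxl c
        (by rw [hmax]; omega)
        (by rw [h2, List.count_append, List.count_singleton]; simp [heq])
        (by
          intro x hx
          rcases List.mem_append.1 hx with hx | hx
          · exact h3 x hx
          · simp at hx; omega)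
        hc1
      exact ⟨rs'', a1, a2, a3, a4, by simp at a5 ⊢; omega⟩
    · have hA : pvStepA A (cnt, maxl, cur) i = (1, c, c) := by
        simp only [pvStepA, ← hc]
        rw [if_neg (by omega), if_pos hgt]
      rw [List.foldl_cons, List.foldl_cons, hB, hA]
      have hnot : c ∉ rs := by
        intro hmem
        have := (PySem.List.le_foldl_max rs 0).2 c hmem
        rw [← h1] at this; omega
      obtain ⟨rs'', a1, a2, a3, a4, a5⟩ := ih (rs ++ [c]) 1 c c
        (by rw [hmax]; omega)
        (by rw [List.count_append, List.count_singleton,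
              List.count_eq_zero_of_not_mem hnot]; simp)
        (by
          intro x hx
          rcases List.mem_append.1 hx with hx | hx
          · exact h3 x hx
          · simp at hx; omega)
        hc1
      exact ⟨rs'', a1, a2, a3, a4, by simp at a5 ⊢; omega⟩

-- ===== VERDICT (by name: the statement is the Claim_ definition above) =====
theorem count_long_subarrays_spec : Claim_equal_count_long_subarrays := by
  intro A _
  unfold Spec_count_long_subarrays count_long_subarrays count_long_subarrays_alt
  by_cases hA : A = []
  · subst hA; simp
  · have hlen : (A.length : Int) ≠ 0 := by
      intro h
      exact hA (List.length_eq_zero_iff.mp (Int.natCast_eq_zero.mp h))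
    simp only [if_neg hlen, if_neg hA]
    obtain ⟨rs', hB, hm, hcnt, hpos, hlenr⟩ :=
      pv_fold_rel A (PySem.List.pyRange 0 (A.length : Int) 1) [] 0 0 1
        (by simp) (by simp) (by simp) (by omega)
    rw [show
        ((PySem.List.pyRange 0 (A.length : Int) 1).foldl
          (fun (st : List Int × Int) i =>
            let cur : Int :=
              if PySem.List.pyGetD A i 0 > PySem.List.pyGetD A (i-1) 0 then st.2 + 1 else 1
            (st.1 ++ [cur], cur)) ([], 1))
          = (PySem.List.pyRange 0 (A.length : Int) 1).foldl (pvStepB A) ([], 1) from rfl,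
      hB]
    have hne : rs' ≠ [] := by
      intro h
      rw [h] at hlenr
      simp [PySem.List.length_pyRange_one] at hlenr
      omega
    obtain ⟨h, t, rfl⟩ := List.exists_cons_of_ne_nil hne
    rw [PySem.List.max?_id_cons]
    have hmax0 : (h :: t).foldl max 0 = t.foldl max h := by
      have h1 : 1 ≤ h := hpos h (by simp)
      simp [List.foldl_cons, show max 0 h = h by omega]
    rw [show
        ((PySem.List.pyRange 0 (A.length : Int) 1).foldl
          (fun (st : Int × Int × Int) i =>
            let cur : Int :=
              if PySem.List.pyGetD A i 0 > PySem.List.pyGetD A (i-1) 0 then st.2.2 + 1 else 1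
            if cur = st.2.1 then (st.1 + 1, st.2.1, cur)
            else if st.2.1 < cur then (1, cur, cur)
            else (st.1, st.2.1, cur)) (0, 0, 1))
          = (PySem.List.pyRange 0 (A.length : Int) 1).foldl (pvStepA A) (0, 0, 1) from rfl]
    rw [hcnt, hm, hmax0]
    simp [PySem.List.count_eq]
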